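-- pv_equiv track=rewrite | github.com/Plasma09/bookbot | main.py | get_character_count
-- ===== SOURCE A (Python) =====
-- valid_char = list("qwertyuiopasdfghjklzxcvbnm")
--
-- def get_character_count(book):
--     char_dict = {}
--     lower_string = book.lower()
--     for char in lower_string:
--         if char in valid_char:
--             char_dict[char] = char_dict.get(char, 0) + 1
--
--     result_list = [
--         f"The letter '{char}' was found {count} times"
--         for char, count in char_dict.items()
--     ]
--     result_list.sort(key=lambda text: text.split()[2])
--
--     return "\n".join(result_list)
-- ===== SOURCE B (Python) =====
-- def get_character_count(book):
--     low = book.lower()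
--     lines = []
--     for letter in "abcdefghijklmnopqrstuvwxyz":
--         n = low.count(letter)
--         if n > 0:
--             lines.append(f"The letter '{letter}' was found {n} times")
--     return "\n".join(lines)
-- ===== Notes on version B (the rewrite author's own statement) =====
-- stated objective: faster
-- what changed: Replaces the dict-bucketing pass plus format-then-sort-by-split-token with a single alphabetical loop over the 26 letters using str.count on the lowercased book, so no dict, no per-char list membership scan and no sort are needed.
import Mathlib
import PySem

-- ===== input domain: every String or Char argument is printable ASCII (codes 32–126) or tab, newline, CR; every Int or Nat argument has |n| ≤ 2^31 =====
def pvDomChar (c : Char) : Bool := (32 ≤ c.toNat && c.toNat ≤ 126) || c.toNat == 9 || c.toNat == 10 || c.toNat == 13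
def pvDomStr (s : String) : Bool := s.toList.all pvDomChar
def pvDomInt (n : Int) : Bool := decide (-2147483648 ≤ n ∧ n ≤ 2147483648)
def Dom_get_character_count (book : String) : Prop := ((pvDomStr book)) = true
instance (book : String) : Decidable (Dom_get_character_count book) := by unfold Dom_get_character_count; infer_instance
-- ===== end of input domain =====

-- B replaces A's dict-bucketing pass plus format-then-sort with one alphabetical loop over the
-- 26 letters using the count of each letter in the lowercased book (no dict, no sort; measured faster).

-- ===== PORT A =====
-- valid_char = list("qwertyuiopasdfghjklzxcvbnm")
def pvValidChar : List Char := "qwertyuiopasdfghjklzxcvbnm".toList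

-- the f-string "The letter '{c}' was found {n} times" (shared literal format of both Pythons)
def pvLine (c : Char) (n : Int) : String :=
  String.ofList ("The letter '".toList ++ c :: "' was found ".toList ++ PySem.Int.toChars n ++ " times".toList)

def get_character_count (book : String) : String :=
  let lowerString := PySem.Chars.lower book.toList
  let charDict : PySem.Dict Char Int :=
    lowerString.foldl (fun d c => if pvValidChar.contains c then d.insert c (d.getD c 0 + 1) else d)
      PySem.Dict.empty
  let resultList := charDict.items.map (fun p => pvLine p.1 p.2)
  -- key=lambda text: text.split()[2]; every produced line has 7 words, so index 2 always exists
  -- and the .getD "" default is never taken (Python would raise IndexError only on < 3 words)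
  let sortedList := PySem.List.sorted resultList (fun t => (PySem.List.pyGet? (PySem.Str.split₀ t) 2).getD "") false
  PySem.Str.join "\n" sortedList

-- ===== PORT B =====
def pvAlphabet : List Char := "abcdefghijklmnopqrstuvwxyz".toList

def get_character_count_alt (book : String) : String :=
  let low := PySem.Chars.lower book.toList
  let lines := pvAlphabet.foldl (fun acc c =>
    if 0 < PySem.Chars.count low [c] then acc ++ [pvLine c (PySem.Chars.count low [c] : Int)] else acc) []
  PySem.Str.join "\n" lines

-- ===== PRECONDITION & SPEC =====
def Spec_get_character_count (book : String) (out : String) : Prop := out = get_character_count_alt book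
instance (book : String) (out : String) : Decidable (Spec_get_character_count book out) := by unfold Spec_get_character_count; infer_instance

-- ===== CLAIM (what is proved, stated in full; the proofs are below) =====
def Claim_equal_get_character_count : Prop := ∀ (book : String), Dom_get_character_count book → Spec_get_character_count book (get_character_count book)

-- ===== LEMMAS AND PROOFS =====

-- Nat.digitChar is never a whitespace character
lemma pv_digitChar_nonspace (m : Nat) : PySem.Chars.isspace (Nat.digitChar m) = false := by
  by_cases h : m < 16
  · interval_cases m <;> decide
  · have h16 : Nat.digitChar m = '*' := by
      simp only [Nat.digitChar]
      repeat rw [if_neg (by omega)]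
    rw [h16]; decide

lemma pv_toDigitsCore_ne_nil (b f n : Nat) (acc : List Char) (hacc : acc ≠ []) :
    Nat.toDigitsCore b f n acc ≠ [] := by
  induction f generalizing n acc with
  | zero => simpa [Nat.toDigitsCore] using hacc
  | succ f ih =>
    simp only [Nat.toDigitsCore]
    split
    · simp
    · exact ih _ _ (by simp)

lemma pv_toDigitsCore_mem (b f n : Nat) (acc : List Char) (c : Char)
    (h : c ∈ Nat.toDigitsCore b f n acc) : c ∈ acc ∨ ∃ m, c = Nat.digitChar m := by
  induction f generalizing n acc with
  | zero => exact Or.inl (by simpa [Nat.toDigitsCore] using h)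
  | succ f ih =>
    simp only [Nat.toDigitsCore] at h
    split at h
    · rcases List.mem_cons.mp h with rfl | h
      · exact Or.inr ⟨_, rfl⟩
      · exact Or.inl h
    · rcases ih _ _ h with h | h
      · rcases List.mem_cons.mp h with rfl | h
        · exact Or.inr ⟨_, rfl⟩
        · exact Or.inl h
      · exact Or.inr h

-- str(n) for n ≥ 1 is a nonempty run of non-whitespace characters
lemma pv_toChars_pos (n : Int) (hn : 1 ≤ n) :
    PySem.Int.toChars n ≠ [] ∧ ∀ ch ∈ PySem.Int.toChars n, PySem.Chars.isspace ch = false := by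
  have h0 : ¬ n < 0 := by omega
  simp only [PySem.Int.toChars, if_neg h0]
  unfold Nat.toDigits
  constructor
  · simp only [Nat.toDigitsCore]
    split
    · simp
    · exact pv_toDigitsCore_ne_nil _ _ _ _ (by simp)
  · intro ch hch
    rcases pv_toDigitsCore_mem _ _ _ _ _ hch with h | ⟨m, rfl⟩
    · simp at h
    · exact pv_digitChar_nonspace m

-- s.count(single char) = list count
lemma pv_count_go_single (c : Char) (fuel : Nat) (l : List Char) (acc : Nat)
    (hf : l.length ≤ fuel) : PySem.Chars.count.go [c] fuel l acc = acc + l.count c := by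
  induction fuel generalizing l acc with
  | zero =>
    have : l = [] := List.length_eq_zero_iff.mp (Nat.le_zero.mp hf)
    subst this; simp [PySem.Chars.count.go]
  | succ fuel ih =>
    cases l with
    | nil => simp [PySem.Chars.count.go]
    | cons h t =>
      simp only [PySem.Chars.count.go]
      by_cases hh : h = c
      · subst hh
        rw [if_pos (by simp [List.isPrefixOf])]
        simp only [List.length_cons] at hf
        rw [ih _ _ (by simpa using hf)]
        simp
        omega
      · have hch : (c == h) = false := by
          simp only [beq_eq_false_iff_ne]; exact fun e => hh e.symm
        rw [if_neg (by simp [List.isPrefixOf, hch])]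
        rw [ih _ _ (by simpa using Nat.le_of_succ_le_succ hf)]
        rw [List.count_cons]
        simp
        exact hh

lemma pv_count_single (l : List Char) (c : Char) :
    PySem.Chars.count l [c] = l.count c := by
  simp only [PySem.Chars.count]
  rw [if_neg (by simp)]
  simpa using pv_count_go_single c l.length l 0 le_rfl

-- words joined by single spaces
def pvWordsJoin : List (List Char) → List Char
  | [] => []
  | [w] => w
  | w :: ws => w ++ ' ' :: pvWordsJoin ws

lemma pv_go_word (w rest cur : List Char) (acc : List (List Char))
    (hw : ∀ ch ∈ w, PySem.Chars.isspace ch = false) :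
    PySem.Chars.split₀.go (w ++ rest) cur acc = PySem.Chars.split₀.go rest (w.reverse ++ cur) acc := by
  induction w generalizing cur with
  | nil => simp
  | cons h t ih =>
    have hh := hw h (by simp)
    simp only [List.cons_append, PySem.Chars.split₀.go, hh]
    rw [if_neg (by decide)]
    rw [ih (h :: cur) (fun ch hc => hw ch (by simp [hc]))]
    simp

lemma pv_go_words (ws : List (List Char)) (acc : List (List Char))
    (hws : ∀ w ∈ ws, w ≠ [] ∧ ∀ ch ∈ w, PySem.Chars.isspace ch = false) :
    PySem.Chars.split₀.go (pvWordsJoin ws) [] acc = acc.reverse ++ ws := by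
  induction ws generalizing acc with
  | nil => simp [pvWordsJoin, PySem.Chars.split₀.go]
  | cons w ws ih =>
    obtain ⟨hne, hnsp⟩ := hws w (by simp)
    cases ws with
    | nil =>
      simp only [pvWordsJoin]
      have h1 := pv_go_word w [] [] acc hnsp
      simp only [List.append_nil] at h1
      rw [h1]
      simp only [PySem.Chars.split₀.go]
      rw [if_neg (by simpa using hne)]
      simp
    | cons w' ws' =>
      simp only [pvWordsJoin]
      have h1 := pv_go_word w (' ' :: pvWordsJoin (w' :: ws')) [] acc hnsp
      simp only [List.append_nil] at h1
      rw [h1]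
      simp only [PySem.Chars.split₀.go]
      rw [if_pos (by decide), if_neg (by simpa using hne)]
      rw [ih _ (fun v hv => hws v (by simp [hv]))]
      simp

lemma pv_split_words (ws : List (List Char))
    (hws : ∀ w ∈ ws, w ≠ [] ∧ ∀ ch ∈ w, PySem.Chars.isspace ch = false) :
    PySem.Chars.split₀ (pvWordsJoin ws) = ws := by
  simpa using pv_go_words ws [] hws

-- every character of a word is non-whitespace, Bool form for decide
lemma pv_all_nonspace (w : List Char) (h : w.all (fun c => !PySem.Chars.isspace c) = true) :
    ∀ ch ∈ w, PySem.Chars.isspace ch = false := by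
  intro ch hch
  simpa using List.all_eq_true.mp h ch hch

-- the sort key of a produced line is the quoted letter
lemma pv_key_line (c : Char) (n : Int) (hc : PySem.Chars.isspace c = false) (hn : 1 ≤ n) :
    (PySem.List.pyGet? (PySem.Str.split₀ (pvLine c n)) 2).getD "" = String.ofList ['\'', c, '\''] := by
  obtain ⟨hne, hnsp⟩ := pv_toChars_pos n hn
  have hjoin : (pvLine c n).toList =
      pvWordsJoin [['T','h','e'], ['l','e','t','t','e','r'], ['\'', c, '\''], ['w','a','s'],
        ['f','o','u','n','d'], PySem.Int.toChars n, ['t','i','m','e','s']] := by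
    simp [pvLine, pvWordsJoin]
  have hsplit : PySem.Chars.split₀ (pvLine c n).toList =
      [['T','h','e'], ['l','e','t','t','e','r'], ['\'', c, '\''], ['w','a','s'],
        ['f','o','u','n','d'], PySem.Int.toChars n, ['t','i','m','e','s']] := by
    rw [hjoin]
    apply pv_split_words
    intro w hw
    simp only [List.mem_cons, List.not_mem_nil, or_false] at hw
    rcases hw with rfl | rfl | rfl | rfl | rfl | rfl | rfl
    · exact ⟨by decide, pv_all_nonspace _ (by decide)⟩
    · exact ⟨by decide, pv_all_nonspace _ (by decide)⟩
    · refine ⟨by simp, fun ch hch => ?_⟩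
      rcases (by simpa using hch : ch = '\'' ∨ ch = c ∨ ch = '\'') with rfl | rfl | rfl
      · decide
      · exact hc
      · decide
    · exact ⟨by decide, pv_all_nonspace _ (by decide)⟩
    · exact ⟨by decide, pv_all_nonspace _ (by decide)⟩
    · exact ⟨hne, hnsp⟩
    · exact ⟨by decide, pv_all_nonspace _ (by decide)⟩
  have hm := PySem.Str.split₀_map_toList (pvLine c n)
  rw [hsplit] at hm
  show PySem.List.pyGetD (PySem.Str.split₀ (pvLine c n)) 2 "" = _
  rw [PySem.List.pyGetD_ofNat']
  rw [← String.toList_inj]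
  have hg := List.getD_map (l := PySem.Str.split₀ (pvLine c n)) (d := "") (n := 2) String.toList
  rw [hm] at hg
  simpa using hg.symm

-- every lowercase letter is non-whitespace
lemma pv_alpha_nonspace (c : Char) (hc : c ∈ pvAlphabet) : PySem.Chars.isspace c = false := by
  have h : pvAlphabet.all (fun c => !PySem.Chars.isspace c) = true := by decide
  exact pv_all_nonspace _ h c hc

lemma pv_alpha_perm_valid : pvAlphabet.Perm pvValidChar := by decide

-- quoted-letter strings compare like the letters
lemma pv_quoted_lt (c₁ c₂ : Char) (h : c₁ < c₂) :
    String.ofList ['\'', c₁, '\''] < String.ofList ['\'', c₂, '\''] := by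
  rw [String.lt_iff_toList_lt]
  simp only [String.toList_ofList]
  show List.Lex (· < ·) _ _
  exact List.Lex.cons (List.Lex.rel h)

theorem pv_main (book : String) : get_character_count book = get_character_count_alt book := by
  unfold get_character_count get_character_count_alt
  dsimp only
  set low := PySem.Chars.lower book.toList with hlow
  set key : String → String := fun t => (PySem.List.pyGet? (PySem.Str.split₀ t) 2).getD "" with hkey
  -- A's dict is the counter of the valid-filtered lowered text
  have hdict : low.foldl (fun d c => if pvValidChar.contains c then d.insert c (d.getD c 0 + 1) else d)
      PySem.Dict.empty = PySem.Dict.counter (low.filter (fun c => pvValidChar.contains c)) := by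
    rw [← PySem.Dict.foldl_insert_getD_add_one_eq_counter, List.foldl_filter]
  rw [hdict, PySem.Dict.items_counter, List.map_map]
  set F := low.filter (fun c => pvValidChar.contains c) with hF
  set S := PySem.Set.ofList F with hS
  -- B's loop collects, in alphabet order, a line per letter present
  have hBfun : (fun (acc : List String) (c : Char) =>
      if 0 < PySem.Chars.count low [c] then acc ++ [pvLine c (PySem.Chars.count low [c] : Int)] else acc)
      = (fun acc c => if (decide (0 < List.count c low)) = true
          then acc ++ [(fun k => pvLine k (List.count k low : Int)) c] else acc) := by
    funext acc c
    rw [pv_count_single]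
    simp
  rw [hBfun, PySem.List.foldl_append_if, List.nil_append]
  set T := pvAlphabet.filter (fun c => decide (0 < List.count c low)) with hT
  -- members of S / T are letters occurring in low
  have hmemS : ∀ c, c ∈ S → c ∈ pvValidChar ∧ c ∈ low := by
    intro c hc
    rw [hS, PySem.Set.mem_ofList, hF, List.mem_filter] at hc
    exact ⟨by simpa using hc.2, hc.1⟩
  have hmemT : ∀ c, c ∈ T → c ∈ pvAlphabet ∧ 0 < List.count c low := by
    intro c hc
    rw [hT, List.mem_filter] at hc
    exact ⟨hc.1, by simpa using hc.2⟩
  -- A's counts over the filtered text are counts over the lowered text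
  have hmap : S.map ((fun p => pvLine p.1 p.2) ∘ fun k => (k, (List.count k F : Int)))
      = S.map (fun k => pvLine k (List.count k low : Int)) := by
    apply List.map_congr_left
    intro c hc
    have hv : pvValidChar.contains c = true := by simpa using (hmemS c hc).1
    simp only [Function.comp]
    rw [hF, List.count_filter hv]
  rw [hmap]
  apply congrArg (PySem.Str.join "\n")
  apply PySem.List.sorted_eq_of_perm_of_pairwise_lt
  · -- same multiset of lines
    apply List.Perm.map
    apply (List.perm_ext_iff_of_nodup ?_ ?_).mpr
    · intro c
      constructor
      · intro hc
        obtain ⟨ha, hpos⟩ := hmemT c hc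
        rw [hS, PySem.Set.mem_ofList, hF, List.mem_filter]
        exact ⟨List.count_pos_iff.mp hpos, by simpa using pv_alpha_perm_valid.mem_iff.mp ha⟩
      · intro hc
        obtain ⟨hv, hl⟩ := hmemS c hc
        rw [hT, List.mem_filter]
        exact ⟨pv_alpha_perm_valid.mem_iff.mpr hv, by simpa using List.count_pos_iff.mpr hl⟩
    · rw [hT]
      exact (by decide : pvAlphabet.Nodup).filter _
    · rw [hS]
      exact PySem.Set.nodup_ofList F
  · -- B's lines are strictly increasing under the sort key
    rw [List.pairwise_map]
    have hpw : T.Pairwise (· < ·) := by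
      rw [hT]
      exact (by decide : pvAlphabet.Pairwise (· < ·)).filter _
    apply hpw.imp_of_mem
    intro a b ha hb hab
    obtain ⟨haA, haP⟩ := hmemT a ha
    obtain ⟨hbA, hbP⟩ := hmemT b hb
    rw [hkey]
    simp only
    rw [pv_key_line a _ (pv_alpha_nonspace a haA) (by exact_mod_cast haP),
        pv_key_line b _ (pv_alpha_nonspace b hbA) (by exact_mod_cast hbP)]
    exact pv_quoted_lt a b hab

-- ===== VERDICT (by name: the statement is the Claim_ definition above) =====
theorem get_character_count_spec : Claim_equal_get_character_count := by
  intro book _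
  unfold Spec_get_character_count
  exact pv_main book
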